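-- pv_equiv track=rewrite | github.com/max533/software_develop_requirement | develop_requirement_proj/utils/mixins.py | count_zero_occurence
-- ===== SOURCE A (Python) =====
-- def count_zero_occurence(department_id):
--     """ count zero occurence time """
--     count = 0
--     for char in department_id[::-1]:
--         if char == '0':
--             count += 1
--         elif char != '0':
--             break
--     return count
-- ===== SOURCE B (Python) =====
-- def count_zero_occurence(department_id):
--     """ count zero occurence time """
--     return len(department_id) - len(department_id.rstrip('0'))
-- ===== Notes on version B (the rewrite author's own statement) =====
-- stated objective: idiomatic
-- what changed: Replaces the explicit reverse-scan loop with break by a single closed-form expression: the length difference before and after stripping trailing zero characters with rstrip.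
import Mathlib
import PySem

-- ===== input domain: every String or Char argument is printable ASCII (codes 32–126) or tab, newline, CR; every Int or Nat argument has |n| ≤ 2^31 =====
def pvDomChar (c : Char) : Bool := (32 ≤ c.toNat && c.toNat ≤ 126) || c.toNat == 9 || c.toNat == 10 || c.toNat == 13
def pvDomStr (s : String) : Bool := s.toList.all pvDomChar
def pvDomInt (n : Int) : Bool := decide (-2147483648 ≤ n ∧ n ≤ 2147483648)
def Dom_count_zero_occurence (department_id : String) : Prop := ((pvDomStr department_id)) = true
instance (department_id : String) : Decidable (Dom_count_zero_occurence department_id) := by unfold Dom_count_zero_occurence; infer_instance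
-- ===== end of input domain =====

-- B replaces A's explicit reverse-scan loop with break by the closed form
-- len(s) - len(s.rstrip('0')); objective: idiomatic.

-- ===== PORT A =====
-- the for-loop with break, over s[::-1], carrying the running count
def pvCountLoop : List Char → Int → Int
  | [], count => count
  | c :: rest, count =>
      if c = '0' then pvCountLoop rest (count + 1)
      else count  -- elif char != '0': break

def count_zero_occurence (department_id : String) : Int :=
  pvCountLoop ((PySem.List.slice? department_id.toList none none (-1)).getD []) 0

-- ===== PORT B =====
-- s.rstrip('0'), ported by hand: drop trailing '0' characters (exact for this one-char strip set)
def pvRstripZeros (l : List Char) : List Char :=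
  (l.reverse.dropWhile (· == '0')).reverse

def count_zero_occurence_alt (department_id : String) : Int :=
  (department_id.toList.length : Int) - (pvRstripZeros department_id.toList).length

-- ===== PRECONDITION & SPEC =====
def Spec_count_zero_occurence (department_id : String) (out : Int) : Prop := out = count_zero_occurence_alt department_id
instance (department_id : String) (out : Int) : Decidable (Spec_count_zero_occurence department_id out) := by unfold Spec_count_zero_occurence; infer_instance

-- ===== CLAIM (what is proved, stated in full; the proofs are below) =====
def Claim_equal_count_zero_occurence : Prop := ∀ (department_id : String), Dom_count_zero_occurence department_id → Spec_count_zero_occurence department_id (count_zero_occurence department_id)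

-- ===== LEMMAS AND PROOFS =====

theorem pvCountLoop_eq_takeWhile (l : List Char) (c : Int) :
    pvCountLoop l c = c + (l.takeWhile (· == '0')).length := by
  induction l generalizing c with
  | nil => simp [pvCountLoop]
  | cons a rest ih =>
      by_cases h : a = '0'
      · simp [pvCountLoop, h, List.takeWhile, ih]; ring
      · simp [pvCountLoop, h]

theorem takeWhile_add_dropWhile_length (l : List Char) :
    (l.takeWhile (· == '0')).length + (l.dropWhile (· == '0')).length = l.length := by
  conv_rhs => rw [← List.takeWhile_append_dropWhile (p := (· == '0')) (l := l)]
  rw [List.length_append]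

-- ===== VERDICT (by name: the statement is the Claim_ definition above) =====
theorem count_zero_occurence_spec : Claim_equal_count_zero_occurence := by
  intro s _
  unfold Spec_count_zero_occurence count_zero_occurence count_zero_occurence_alt pvRstripZeros
  rw [PySem.List.slice?_none_none_neg_one]
  simp only [Option.getD_some, pvCountLoop_eq_takeWhile, List.length_reverse]
  have h := takeWhile_add_dropWhile_length s.toList.reverse
  have hl : s.toList.reverse.length = s.toList.length := List.length_reverse
  omega
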